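-- pv_equiv track=rewrite | github.com/voronaizsela/crypro-24-25 | lab2/vashchaiev_fb-23_lytvyn_fb-23_cp2/decrypt.py | make_bloks
-- ===== SOURCE A (Python) =====
-- def make_bloks(text, r):
--     lst = list()
--     for i in range(r):
--         word = ""
--         for j in range(i, len(text), r):
--             word += text[j]
--         lst.append(word)
--
--     return lst
-- ===== SOURCE B (Python) =====
-- def make_bloks(text, r):
--     if r <= 0:
--         return []
--     lst = ["" for _ in range(r)]
--     for idx, ch in enumerate(text):
--         lst[idx % r] += ch
--     return lst
-- ===== Notes on version B (the rewrite author's own statement) =====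
-- stated objective: alternative
-- what changed: Replaces A's r separate stride loops (each re-indexing the text at i, i+r, ...) by one round-robin pass over enumerate(text) that appends each character to bucket idx % r.
import Mathlib
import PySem

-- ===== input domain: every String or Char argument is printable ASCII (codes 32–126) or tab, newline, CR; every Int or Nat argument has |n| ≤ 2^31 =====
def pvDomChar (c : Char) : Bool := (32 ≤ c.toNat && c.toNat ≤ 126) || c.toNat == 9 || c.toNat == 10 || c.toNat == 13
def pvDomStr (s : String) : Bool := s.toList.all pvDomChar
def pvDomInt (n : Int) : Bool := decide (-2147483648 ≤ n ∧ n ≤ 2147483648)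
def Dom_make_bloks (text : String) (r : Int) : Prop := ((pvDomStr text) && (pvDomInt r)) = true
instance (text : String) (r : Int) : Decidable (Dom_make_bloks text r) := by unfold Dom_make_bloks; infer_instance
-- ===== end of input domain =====

-- B replaces A's r separate stride loops by one round-robin pass over enumerate(text)
-- into r buckets (alternative decomposition; same asymptotic cost).


-- ===== PORT A =====
-- for i in range(r): word = ""; for j in range(i, len(text), r): word += text[j]; lst.append(word)
def make_bloks (text : String) (r : Int) : List String :=
  (PySem.List.pyRange 0 r 1).foldl
    (fun lst i =>
      lst ++ [(PySem.List.pyRange i (PySem.Str.len text) r).foldl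
        (fun word j =>
          match PySem.Str.pyGet? text j with
          | some c => word.push c
          | none => word)   -- unreachable: j is always in range
        ""])
    []

-- ===== PORT B =====
-- if r <= 0: return []; lst = ["" for _ in range(r)]; for idx, ch in enumerate(text): lst[idx % r] += ch
def make_bloks_alt (text : String) (r : Int) : List String :=
  if r ≤ 0 then []
  else
    (PySem.List.enumerate text.toList).foldl
      (fun lst p => lst.modify (PySem.Int.mod p.1 r).toNat (fun w => w.push p.2))
      ((PySem.List.pyRange 0 r 1).map (fun _ => ""))

-- ===== PRECONDITION & SPEC =====
def Spec_make_bloks (text : String) (r : Int) (out : List String) : Prop := out = make_bloks_alt text r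
instance (text : String) (r : Int) (out : List String) : Decidable (Spec_make_bloks text r out) := by unfold Spec_make_bloks; infer_instance

-- ===== CLAIM (what is proved, stated in full; the proofs are below) =====
def Claim_equal_make_bloks : Prop := ∀ (text : String) (r : Int), Dom_make_bloks text r → Spec_make_bloks text r (make_bloks text r)

-- ===== LEMMAS AND PROOFS =====

-- Specification skeleton: the characters of text at positions ≡ i (mod m), walking
-- the remaining characters `rest` with absolute position counter k.
def pvStride (m i : Nat) : Nat → List Char → List Char
  | _, [] => []
  | k, c :: rest => (if k % m = i then [c] else []) ++ pvStride m i (k+1) rest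

theorem pvStride_nil (m i k : Nat) : pvStride m i k [] = [] := rfl

-- general-step pyRange unfolding lemmas
theorem pvRange_pos_nil {a b s : Int} (hs : 0 < s) (h : b ≤ a) :
    PySem.List.pyRange a b s = [] := by
  rw [PySem.List.pyRange_of_pos _ _ hs, if_neg (by omega)]
  simp

theorem pvRange_pos_cons {a b s : Int} (hs : 0 < s) (h : a < b) :
    PySem.List.pyRange a b s = a :: PySem.List.pyRange (a + s) b s := by
  rw [PySem.List.pyRange_of_pos _ _ hs, PySem.List.pyRange_of_pos _ _ hs, if_pos h]
  have key : b - a + s - 1 = (b - (a + s) + s - 1) + 1 * s := by ring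
  by_cases h2 : a + s < b
  · have hq : 0 ≤ (b - (a + s) + s - 1) / s := Int.ediv_nonneg (by omega) (by omega)
    have hc : ((b - a + s - 1) / s).toNat = ((b - (a + s) + s - 1) / s).toNat + 1 := by
      rw [key, Int.add_mul_ediv_right _ _ hs.ne']
      omega
    rw [if_pos h2, hc, List.range_succ_eq_map]
    simp only [List.map_cons, List.map_map, Nat.cast_zero, mul_zero, add_zero]
    refine congrArg _ ?_
    refine List.map_congr_left (fun k _ => ?_)
    simp only [Function.comp]
    push_cast
    ring
  · have ht : (b - (a + s) + s - 1) / s = 0 :=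
      Int.ediv_eq_zero_of_lt (by omega) (by omega)
    have hc : ((b - a + s - 1) / s).toNat = 1 := by
      rw [key, Int.add_mul_ediv_right _ _ hs.ne', ht]
      rfl
    rw [if_neg h2, hc]
    simp

theorem pvStride_skip_one {cs : List Char} {m i k : Nat} (h : k % m ≠ i) :
    pvStride m i k (cs.drop k) = pvStride m i (k+1) (cs.drop (k+1)) := by
  by_cases hk : k < cs.length
  · rw [List.drop_eq_getElem_cons hk]
    simp [pvStride, h]
  · rw [List.drop_eq_nil_of_le (by omega), List.drop_eq_nil_of_le (by omega)]
    rfl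

theorem pvStride_skip {cs : List Char} {m i : Nat} :
    ∀ (t k : Nat), (∀ j, j < t → (k + j) % m ≠ i) →
    pvStride m i k (cs.drop k) = pvStride m i (k + t) (cs.drop (k + t)) := by
  intro t
  induction t with
  | zero => intro k _; rfl
  | succ t ih =>
    intro k hj
    have h0 : k % m ≠ i := by simpa using hj 0 (by omega)
    rw [pvStride_skip_one h0]
    have := ih (k+1) (fun j hjt => by
      have := hj (j+1) (by omega)
      simpa [Nat.add_assoc, Nat.add_comm 1 j] using this)
    rw [this]
    ring_nf

theorem pvStride_step {cs : List Char} {m i k : Nat} (hm : 0 < m)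
    (hk : k < cs.length) (hki : k % m = i) :
    pvStride m i k (cs.drop k) = cs[k] :: pvStride m i (k + m) (cs.drop (k + m)) := by
  rw [List.drop_eq_getElem_cons hk]
  simp only [pvStride, if_pos hki, List.singleton_append]
  refine congrArg _ ?_
  have h1 : k + m = (k + 1) + (m - 1) := by omega
  rw [h1, pvStride_skip (m-1) (k+1)]
  intro j hj hcon
  -- (k+1+j) % m = i = k % m with 0 < 1+j < m+1, 1+j ≤ m-1+1 = m ⇒ contradiction
  have h2 : (k + 1 + j) % m = k % m := by rw [hki, hcon]
  have hmod : Nat.ModEq m (k + 1 + j) k := h2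
  have hd : (m : Int) ∣ (k : Int) - (k + 1 + j) := (Nat.modEq_iff_dvd).mp hmod
  have hd2 : (m : Int) ∣ -((1 : Int) + j) := by
    convert hd using 1
    ring
  have hd3 : (m : Int) ∣ ((1 : Int) + j) := (dvd_neg).mp hd2
  have hle := Int.le_of_dvd (by omega) hd3
  omega

-- A's inner loop computes one stride block
theorem pvInnerA (text : String) (m i : Nat) (hm : 0 < m) (_hi : i < m) :
    ∀ (d k : Nat) (l : List Char), text.toList.length - k ≤ d → k % m = i →
    (PySem.List.pyRange (k : Int) (PySem.Str.len text) (m : Int)).foldl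
      (fun word j =>
        match PySem.Str.pyGet? text j with
        | some c => word.push c
        | none => word)
      (String.ofList l)
    = String.ofList (l ++ pvStride m i k (text.toList.drop k)) := by
  intro d
  induction d with
  | zero =>
    intro k l hd hk
    have hk' : text.toList.length ≤ k := by omega
    rw [PySem.Str.len_eq, pvRange_pos_nil (by exact_mod_cast hm) (by exact_mod_cast hk')]
    rw [List.drop_eq_nil_of_le hk']
    simp [pvStride]
  | succ d ih =>
    intro k l hd hk
    by_cases hkn : k < text.toList.length
    · rw [PySem.Str.len_eq,
        pvRange_pos_cons (by exact_mod_cast hm) (by exact_mod_cast hkn)]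
      simp only [List.foldl_cons]
      have hget : PySem.Str.pyGet? text (k : Int) = some (text.toList[k]'hkn) := by
        rw [PySem.Str.pyGet?_natCast]
        simp
      simp only [hget]
      have hcast : (k : Int) + (m : Int) = ((k + m : Nat) : Int) := by push_cast; ring
      have hpush : (String.ofList l).push (text.toList[k]'hkn)
          = String.ofList (l ++ [text.toList[k]'hkn]) := by
        apply String.toList_injective
        simp
      rw [hcast, hpush, ← PySem.Str.len_eq,
        ih (k + m) (l ++ [text.toList[k]'hkn]) (by omega)
          (by rw [Nat.add_mod_right]; exact hk)]
      rw [pvStride_step hm hkn hk]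
      simp
    · have hk' : text.toList.length ≤ k := by omega
      rw [PySem.Str.len_eq, pvRange_pos_nil (by exact_mod_cast hm) (by exact_mod_cast hk')]
      rw [List.drop_eq_nil_of_le hk']
      simp [pvStride]

-- B's fold maintains one bucket per residue class
theorem pvModCast (k : Nat) (m : Nat) : PySem.Int.mod (k : Int) (m : Int) = ((k % m : Nat) : Int) := by
  simp [PySem.Int.mod, Int.fmod_eq_emod]

theorem pvFoldB (r : Int) (m : Nat) (hm : 0 < m) (hr : (m : Int) = r) :
    ∀ (rest : List Char) (k : Nat) (ws : List String), ws.length = m →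
    (PySem.List.enumerate rest (k : Int)).foldl
      (fun lst p => lst.modify (PySem.Int.mod p.1 r).toNat (fun w => w.push p.2))
      ws
    = (List.range m).map (fun i => ws.getD i "" ++ String.ofList (pvStride m i k rest)) := by
  intro rest
  induction rest with
  | nil =>
    intro k ws hws
    simp only [PySem.List.enumerate_nil, List.foldl_nil, pvStride_nil]
    refine (List.ext_getElem (by simp [hws]) ?_).symm
    intro i h1 h2
    have him : i < m := by simpa using h1
    have hiw : i < ws.length := by omega
    have h0 : (String.ofList ([] : List Char)) = "" := rfl
    simp [List.getD_eq_getElem?_getD, hiw, h0]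
  | cons c rest ih =>
    intro k ws hws
    rw [PySem.List.enumerate_cons]
    simp only [List.foldl_cons]
    have hc : ((k : Int) + 1) = ((k + 1 : Nat) : Int) := by push_cast; ring
    have hmod : (PySem.Int.mod (k : Int) r).toNat = k % m := by
      rw [← hr, pvModCast, Int.toNat_natCast]
    rw [hc, ih (k + 1) _ (by simp [hws])]
    refine List.map_congr_left (fun i hi => ?_)
    have him : i < m := List.mem_range.mp hi
    have hkm : k % m < m := Nat.mod_lt _ hm
    have hgd : (ws.modify (PySem.Int.mod (k : Int) r).toNat (fun w => w.push c)).getD i ""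
        = if k % m = i then (ws.getD i "").push c else ws.getD i "" := by
      rw [hmod]
      have hiw : i < ws.length := by omega
      have hiw' : i < (ws.modify (k % m) (fun w => w.push c)).length := by simp [hiw]
      rw [List.getD_eq_getElem?_getD, List.getElem?_eq_getElem hiw',
          List.getElem_modify, List.getD_eq_getElem?_getD, List.getElem?_eq_getElem hiw]
      by_cases h : k % m = i <;> simp [h]
    rw [hgd]
    show _ = ws.getD i "" ++ String.ofList (pvStride m i k (c :: rest))
    simp only [pvStride]
    by_cases h : k % m = i
    · rw [if_pos h, if_pos h]
      apply String.toList_injective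
      simp
    · rw [if_neg h, if_neg h]
      simp

-- A's result in closed form
theorem pvA_closed (text : String) (r : Int) (m : Nat) (hm : 0 < m) (hr : (m : Int) = r) :
    make_bloks text r
    = (List.range m).map (fun i => String.ofList (pvStride m i 0 text.toList)) := by
  unfold make_bloks
  rw [PySem.List.foldl_append_singleton_eq_map, List.nil_append, ← hr,
      PySem.List.pyRange_zero_natCast, List.map_map]
  refine List.map_congr_left (fun i hi => ?_)
  have him : i < m := List.mem_range.mp hi
  simp only [Function.comp]
  have h0 : ("" : String) = String.ofList [] := rfl
  rw [h0, pvInnerA text m i hm him text.toList.length i [] (by omega) (Nat.mod_eq_of_lt him)]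
  rw [List.nil_append]
  refine congrArg _ ?_
  have := pvStride_skip (cs := text.toList) (m := m) (i := i) i 0
    (fun j hj => by
      have hjm : j < m := by omega
      rw [Nat.zero_add, Nat.mod_eq_of_lt hjm]
      omega)
  simpa using this.symm

-- B's result in closed form
theorem pvB_closed (text : String) (r : Int) (m : Nat) (hm : 0 < m) (hr : (m : Int) = r) :
    make_bloks_alt text r
    = (List.range m).map (fun i => String.ofList (pvStride m i 0 text.toList)) := by
  unfold make_bloks_alt
  rw [if_neg (by omega)]
  have hinit : ((PySem.List.pyRange 0 r 1).map (fun _ => ("" : String)))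
      = List.replicate m "" := by
    rw [← hr, PySem.List.pyRange_zero_natCast, List.map_map]
    simp [List.eq_replicate_iff]
  have h0 : ((0 : Int)) = ((0 : Nat) : Int) := rfl
  have henum : PySem.List.enumerate text.toList = PySem.List.enumerate text.toList ((0:Nat) : Int) := rfl
  rw [hinit, henum, pvFoldB r m hm hr text.toList 0 (List.replicate m "") (by simp)]
  refine List.map_congr_left (fun i hi => ?_)
  have him : i < m := List.mem_range.mp hi
  simp [List.getD_eq_getElem?_getD, him]

-- ===== VERDICT (by name: the statement is the Claim_ definition above) =====
theorem make_bloks_spec : Claim_equal_make_bloks := by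
  intro text r _
  unfold Spec_make_bloks
  by_cases hr : r ≤ 0
  · unfold make_bloks make_bloks_alt
    rw [if_pos hr, PySem.List.pyRange_one_eq_nil hr]
    rfl
  · have hm : 0 < r.toNat := by omega
    have hcast : ((r.toNat : Nat) : Int) = r := by omega
    rw [pvA_closed text r r.toNat hm hcast, pvB_closed text r r.toNat hm hcast]
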